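-- pv_equiv track=rewrite | github.com/EdsonEddy/scsc | notebooks/datasets/large/765987.py | siguiendo_reglas
-- ===== SOURCE A (Python) =====
-- def insert_dig_sum(dig, i):
--   str_num = f"{dig}{i}"
--   return int(str_num)
--
-- def eliminar_ultimo_dig(e):
--   return e // 10
--
-- def sumita(s):
--     sumita = 0
--     while s > 0:
--       sumita += s % 10
--       s //= 10
--     return sumita
--
-- def siguiendo_reglas(num, n):
--   for j in range(n):
--     dig_suma = num
--     while len(str(dig_suma)) != 1:
--       dig_suma = sumita(dig_suma)
--     e = eliminar_ultimo_dig(num)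
--     i = insert_dig_sum(dig_suma, e)
--     num = i
--   return i
-- ===== SOURCE B (Python) =====
-- def _paso(x):
--     d = 0 if x == 0 else 1 + (x - 1) % 9
--     return int(f"{d}{x // 10}")
--
-- def siguiendo_reglas(num, n):
--     seen = {}
--     cur = num
--     k = 0
--     while k < n:
--         if cur in seen:
--             cyc = k - seen[cur]
--             for _ in range((n - k) % cyc):
--                 cur = _paso(cur)
--             return cur
--         seen[cur] = k
--         cur = _paso(cur)
--         k += 1
--     return cur
-- ===== Notes on version B (the rewrite author's own statement) =====
-- stated objective: faster
-- what changed: B replaces A's n-step simulation (which recomputes the digit root by repeated digit-sum while-loops every step) with memoized cycle detection over the orbit plus a modular skip of (n-k) % cycle_length, using the closed-form digit root 1+(x-1)%9.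
import Mathlib
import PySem

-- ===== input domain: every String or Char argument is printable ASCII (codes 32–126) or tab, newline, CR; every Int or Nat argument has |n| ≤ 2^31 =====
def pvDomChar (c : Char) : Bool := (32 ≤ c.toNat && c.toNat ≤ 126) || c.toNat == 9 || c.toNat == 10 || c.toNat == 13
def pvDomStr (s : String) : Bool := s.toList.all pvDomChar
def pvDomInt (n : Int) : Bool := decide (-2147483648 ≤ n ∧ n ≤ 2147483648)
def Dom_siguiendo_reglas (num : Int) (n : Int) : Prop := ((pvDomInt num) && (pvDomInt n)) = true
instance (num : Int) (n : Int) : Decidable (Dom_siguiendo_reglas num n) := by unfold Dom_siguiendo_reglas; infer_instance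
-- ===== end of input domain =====

-- B replaces A's n-step simulation by memoized cycle detection plus a modular skip and a
-- closed-form digit root; objective: faster (a timing run confirms it at large n).

-- ===== PORT A =====

-- sumita's while loop, as tail recursion on the same accumulator state
def pvSumitaLoop (acc : Int) (s : Int) : Int :=
  if 0 < s then pvSumitaLoop (acc + PySem.Int.mod s 10) (PySem.Int.floordiv s 10) else acc
termination_by s.toNat
decreasing_by
  rw [PySem.Int.floordiv_eq_ediv_of_pos (by norm_num : (0:Int) < 10)]
  omega

def sumita (s : Int) : Int := pvSumitaLoop 0 s

-- int(f"{dig}{i}"); the .getD 0 is unreachable inside Pre_ (ofChars? = none is exactly where Python raises ValueError)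
def insert_dig_sum (dig : Int) (i : Int) : Int :=
  (PySem.Int.ofChars? (PySem.Int.toChars dig ++ PySem.Int.toChars i)).getD 0

def eliminar_ultimo_dig (e : Int) : Int := PySem.Int.floordiv e 10

-- the `while len(str(dig_suma)) != 1` loop; fuel d.natAbs + 2 always suffices (totality guard only)
def pvDigLoop : Nat → Int → Int
  | 0, d => d
  | fuel+1, d => if PySem.Str.len (PySem.Int.toStr d) ≠ 1 then pvDigLoop fuel (sumita d) else d

-- state is (num, i); initial i := 0 stands for Python's unbound i (NameError when n ≤ 0, outside Pre_)
def siguiendo_reglas (num : Int) (n : Int) : Int :=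
  ((PySem.List.pyRange 0 n 1).foldl (fun st _ =>
    let dig_suma := pvDigLoop (st.1.natAbs + 2) st.1
    let e := eliminar_ultimo_dig st.1
    let i := insert_dig_sum dig_suma e
    (i, i)) (num, 0)).2

-- ===== PORT B =====

def pvPaso (x : Int) : Int :=
  let d : Int := if x = 0 then 0 else 1 + PySem.Int.mod (x - 1) 9
  (PySem.Int.ofChars? (PySem.Int.toChars d ++ PySem.Int.toChars (PySem.Int.floordiv x 10))).getD 0

-- B's while loop; it runs at most n times, so fuel n.toNat + 1 is a pure totality guard
def pvAltLoop (seen : PySem.Dict Int Int) (cur : Int) (k : Int) (n : Int) : Nat → Int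
  | 0 => cur
  | fuel+1 =>
    if k < n then
      match seen.get? cur with
      | some k0 =>
          (PySem.List.pyRange 0 (PySem.Int.mod (n - k) (k - k0)) 1).foldl
            (fun c _ => pvPaso c) cur
      | none => pvAltLoop (seen.insert cur k) (pvPaso cur) (k + 1) n fuel
    else cur

def siguiendo_reglas_alt (num : Int) (n : Int) : Int :=
  pvAltLoop PySem.Dict.empty num 0 n (n.toNat + 1)

-- ===== PRECONDITION & SPEC =====
-- Pre_ excludes exactly the inputs where A raises: num < 0 (ValueError in int(f"{dig}{e}"))
-- and n ≤ 0 (NameError: `return i` with the loop never entered).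
def Pre_siguiendo_reglas (num : Int) (n : Int) : Prop := 0 ≤ num ∧ 1 ≤ n
instance (num : Int) (n : Int) : Decidable (Pre_siguiendo_reglas num n) := by
  unfold Pre_siguiendo_reglas; infer_instance

def pvWitness_siguiendo_reglas : Int × Int := (38, 3)

def Spec_siguiendo_reglas (num : Int) (n : Int) (out : Int) : Prop := out = siguiendo_reglas_alt num n
instance (num : Int) (n : Int) (out : Int) : Decidable (Spec_siguiendo_reglas num n out) := by unfold Spec_siguiendo_reglas; infer_instance

-- ===== CLAIM (what is proved, stated in full; the proofs are below) =====
def Claim_equal_siguiendo_reglas : Prop := ∀ (num : Int) (n : Int), Dom_siguiendo_reglas num n → Pre_siguiendo_reglas num n → Spec_siguiendo_reglas num n (siguiendo_reglas num n)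

-- ===== LEMMAS AND PROOFS =====

def pvDroot (x : Int) : Int := if x = 0 then 0 else 1 + PySem.Int.mod (x - 1) 9

lemma sumitaLoop_le (s acc : Int) : acc ≤ pvSumitaLoop acc s := by
  induction acc, s using pvSumitaLoop.induct with
  | case1 acc s h ih =>
    rw [pvSumitaLoop, if_pos h]
    have := PySem.Int.mod_nonneg s (b := 10) (by norm_num)
    omega
  | case2 acc s h => rw [pvSumitaLoop, if_neg h]

lemma sumitaLoop_upper (s acc : Int) (h : 0 ≤ s) : pvSumitaLoop acc s ≤ acc + s := by
  induction acc, s using pvSumitaLoop.induct with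
  | case1 acc s h' ih =>
    rw [pvSumitaLoop, if_pos h']
    rw [PySem.Int.mod_eq_emod_of_pos (by norm_num : (0:Int) < 10),
        PySem.Int.floordiv_eq_ediv_of_pos (by norm_num : (0:Int) < 10)] at ih ⊢
    have h2 := ih (by omega)
    omega
  | case2 acc s h' => rw [pvSumitaLoop, if_neg h']; omega

lemma sumitaLoop_mod9 (s acc : Int) (h : 0 ≤ s) :
    pvSumitaLoop acc s % 9 = (acc + s) % 9 := by
  induction acc, s using pvSumitaLoop.induct with
  | case1 acc s h' ih =>
    rw [pvSumitaLoop, if_pos h']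
    rw [PySem.Int.mod_eq_emod_of_pos (by norm_num : (0:Int) < 10),
        PySem.Int.floordiv_eq_ediv_of_pos (by norm_num : (0:Int) < 10)] at ih ⊢
    have h2 := ih (by omega)
    omega
  | case2 acc s h' => rw [pvSumitaLoop, if_neg h']; omega

lemma sumitaLoop_pos (s acc : Int) (h : 0 < s) : acc < pvSumitaLoop acc s := by
  induction acc, s using pvSumitaLoop.induct with
  | case1 acc s h' ih =>
    rw [pvSumitaLoop, if_pos h']
    rw [PySem.Int.mod_eq_emod_of_pos (by norm_num : (0:Int) < 10),
        PySem.Int.floordiv_eq_ediv_of_pos (by norm_num : (0:Int) < 10)] at ih ⊢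
    by_cases hq : 0 < s / 10
    · have := ih hq
      have := PySem.Int.mod_nonneg s (b := 10) (by norm_num)
      rw [PySem.Int.mod_eq_emod_of_pos (by norm_num : (0:Int) < 10)] at this
      omega
    · have hl := sumitaLoop_le (PySem.Int.floordiv s 10) (acc + PySem.Int.mod s 10)
      rw [PySem.Int.mod_eq_emod_of_pos (by norm_num : (0:Int) < 10),
          PySem.Int.floordiv_eq_ediv_of_pos (by norm_num : (0:Int) < 10)] at hl
      omega
  | case2 acc s h' => omega

lemma sumita_lt (s : Int) (h : 10 ≤ s) : sumita s < s := by
  unfold sumita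
  rw [pvSumitaLoop, if_pos (by omega : (0:Int) < s)]
  have hu := sumitaLoop_upper (PySem.Int.floordiv s 10) (0 + PySem.Int.mod s 10)
  rw [PySem.Int.mod_eq_emod_of_pos (by norm_num : (0:Int) < 10),
      PySem.Int.floordiv_eq_ediv_of_pos (by norm_num : (0:Int) < 10)] at hu ⊢
  have := hu (by omega)
  omega

lemma lenToStr_eq_one_iff (d : Int) :
    (PySem.Str.len (PySem.Int.toStr d) = 1) ↔ (0 ≤ d ∧ d ≤ 9) := by
  rw [show PySem.Str.len (PySem.Int.toStr d) = ((PySem.Int.toChars d).length : Int) by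
    simp [PySem.Str.len, PySem.Int.toList_toStr]]
  unfold PySem.Int.toChars
  split
  · rename_i hneg
    have := @Nat.length_toDigits_pos 10 d.natAbs
    constructor
    · intro h
      have hh : ('-' :: Nat.toDigits 10 d.natAbs).length = 1 := by exact_mod_cast h
      simp at hh
      rw [hh] at this
      simp at this
    · intro h; omega
  · rename_i hpos
    have h1 := @Nat.length_toDigits_pos 10 d.toNat
    have h2 := @Nat.length_toDigits_le_iff 10 d.toNat 1 (by norm_num) one_pos
    constructor
    · intro h
      have : (Nat.toDigits 10 d.toNat).length = 1 := by exact_mod_cast h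
      have := h2.mp (by omega)
      constructor <;> omega
    · intro ⟨ha, hb⟩
      have : d.toNat < 10 ^ 1 := by omega
      have := h2.mpr this
      have : (Nat.toDigits 10 d.toNat).length = 1 := by omega
      exact_mod_cast this

lemma digLoop_eq_droot (x : Int) (hx : 0 ≤ x) :
    ∀ fuel, x.toNat + 2 ≤ fuel → pvDigLoop fuel x = pvDroot x := by
  suffices H : ∀ (m : Nat) (x : Int), 0 ≤ x → x.toNat = m →
      ∀ fuel, x.toNat + 2 ≤ fuel → pvDigLoop fuel x = pvDroot x by
    exact H x.toNat x hx rfl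
  intro m
  induction m using Nat.strong_induction_on with
  | _ m ih =>
    intro x hx hm fuel hfuel
    obtain ⟨f, rfl⟩ : ∃ f, fuel = f + 1 := ⟨fuel - 1, by omega⟩
    rw [pvDigLoop]
    by_cases h9 : x ≤ 9
    · rw [if_neg (not_ne_iff.mpr ((lenToStr_eq_one_iff x).mpr ⟨hx, h9⟩))]
      unfold pvDroot
      split_ifs with h0
      · omega
      · rw [PySem.Int.mod_eq_emod_of_pos (by norm_num : (0:Int) < 9)]
        omega
    · rw [if_pos (fun hlen => by have := (lenToStr_eq_one_iff x).mp hlen; omega)]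
      have h0s : 0 ≤ sumita x := sumitaLoop_le x 0
      have hlt : sumita x < x := sumita_lt x (by omega)
      rw [ih (sumita x).toNat (by omega) (sumita x) h0s rfl f (by omega)]
      have hpos : 0 < sumita x := sumitaLoop_pos x 0 (by omega)
      have hm9 : pvSumitaLoop 0 x % 9 = (0 + x) % 9 := sumitaLoop_mod9 x 0 (by omega)
      unfold pvDroot
      unfold sumita at *
      rw [if_neg (by omega), if_neg (by omega),
          PySem.Int.mod_eq_emod_of_pos (by norm_num : (0:Int) < 9),
          PySem.Int.mod_eq_emod_of_pos (by norm_num : (0:Int) < 9)]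
      omega

lemma digits_all (d : Int) (h : 0 ≤ d) : ∀ c ∈ PySem.Int.toChars d, c.isDigit = true := by
  intro c hc
  unfold PySem.Int.toChars at hc
  rw [if_neg (by omega)] at hc
  exact Nat.isDigit_of_mem_toDigits (by norm_num) (by norm_num) hc

lemma pvAux (o : Option Nat) :
    0 ≤ (Option.map (fun (n : Int) => n) (do let a ← o; pure ((a : Int)))).getD 0 := by
  cases o <;> simp

lemma ofChars_digits_nonneg (cs : List Char) (h : ∀ c ∈ cs, c.isDigit = true) :
    0 ≤ (PySem.Int.ofChars? cs).getD 0 := by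
  have hsp : ∀ c ∈ cs, PySem.Int.isIntSpace c = false := by
    intro c hc
    have hd := h c hc
    unfold PySem.Int.isIntSpace
    simp only [Bool.or_eq_false_iff, decide_eq_false_iff_not]
    refine ⟨⟨⟨⟨⟨?_, ?_⟩, ?_⟩, ?_⟩, ?_⟩, ?_⟩ <;> rintro rfl <;> simp [Char.isDigit] at hd
  have hdw : ∀ (l : List Char), (∀ c ∈ l, PySem.Int.isIntSpace c = false) →
      List.dropWhile PySem.Int.isIntSpace l = l := by
    intro l hl
    rw [List.dropWhile_eq_self_iff]
    intro hlen
    simp [hl _ (List.getElem_mem hlen)]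
  unfold PySem.Int.ofChars?
  simp only []
  rw [hdw cs hsp]
  rw [hdw cs.reverse (by intro c hc; exact hsp c (List.mem_reverse.mp hc))]
  rw [List.reverse_reverse]
  split
  · rename_i tl
    have hmem : '-' ∈ '-' :: tl := by simp
    have := h _ hmem
    simp [Char.isDigit] at this
  · exact pvAux _
  · exact pvAux _

lemma paso_nonneg (x : Int) (hx : 0 ≤ x) : 0 ≤ pvPaso x := by
  simp only [pvPaso]
  apply ofChars_digits_nonneg
  intro c hc
  rcases List.mem_append.mp hc with h | h
  · refine digits_all _ ?_ c h
    split_ifs with h0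
    · omega
    · have := PySem.Int.mod_nonneg (x - 1) (b := 9) (by norm_num)
      omega
  · refine digits_all _ ?_ c h
    rw [PySem.Int.floordiv_eq_ediv_of_pos (by norm_num : (0:Int) < 10)]
    omega

lemma stepA_eq (x : Int) (hx : 0 ≤ x) :
    insert_dig_sum (pvDigLoop (x.natAbs + 2) x) (eliminar_ultimo_dig x) = pvPaso x := by
  rw [show x.natAbs + 2 = x.toNat + 2 by omega,
      digLoop_eq_droot x hx (x.toNat + 2) le_rfl]
  simp only [insert_dig_sum, eliminar_ultimo_dig, pvPaso, pvDroot]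

def pvG (st : Int × Int) : Int × Int :=
  let dig_suma := pvDigLoop (st.1.natAbs + 2) st.1
  let e := eliminar_ultimo_dig st.1
  let i := insert_dig_sum dig_suma e
  (i, i)

lemma pvG_eq (y z : Int) (hy : 0 ≤ y) : pvG (y, z) = (pvPaso y, pvPaso y) := by
  simp only [pvG]
  rw [stepA_eq y hy]

lemma pvG_iter (k : Nat) (y : Int) (hy : 0 ≤ y) :
    pvG^[k] (y, y) = (pvPaso^[k] y, pvPaso^[k] y) := by
  induction k generalizing y with
  | zero => simp
  | succ k ihk =>
    rw [Function.iterate_succ_apply, Function.iterate_succ_apply,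
        pvG_eq y y hy, ihk _ (paso_nonneg y hy)]

lemma A_eq_iter (num n : Int) (h0 : 0 ≤ num) (h1 : 1 ≤ n) :
    siguiendo_reglas num n = pvPaso^[n.toNat] num := by
  obtain ⟨m, rfl⟩ : ∃ m : Nat, n = ((m + 1 : Nat) : Int) := ⟨n.toNat - 1, by omega⟩
  have hA : siguiendo_reglas num ((m + 1 : Nat) : Int) =
      ((PySem.List.pyRange 0 ((m + 1 : Nat) : Int) 1).foldl (fun st _ => pvG st) (num, 0)).2 := rfl
  rw [hA, PySem.List.pyRange_zero_natCast, List.foldl_const,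
      List.length_map, List.length_range,
      show (((m + 1 : Nat) : Int)).toNat = m + 1 by omega,
      Function.iterate_succ_apply, pvG_eq num 0 h0,
      pvG_iter m (pvPaso num) (paso_nonneg num h0),
      ← Function.iterate_succ_apply]

lemma iter_per (f : Int → Int) (x : Int) (p c : Nat) (hc : 0 < c)
    (hp : f^[p + c] x = f^[p] x) : ∀ a, f^[p + a] x = f^[p + a % c] x := by
  intro a
  induction a using Nat.strong_induction_on with
  | _ a ih =>
    by_cases hlt : a < c
    · rw [Nat.mod_eq_of_lt hlt]
    · have h2 : f^[p + a] x = f^[a - c] (f^[p + c] x) := by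
        rw [← Function.iterate_add_apply, show a - c + (p + c) = p + a by omega]
      rw [h2, hp, ← Function.iterate_add_apply, show a - c + p = p + (a - c) by omega,
          ih (a - c) (by omega)]
      conv_rhs => rw [Nat.mod_eq_sub_mod (show c ≤ a by omega)]

lemma altLoop_eq (num n : Int) (hn : 0 ≤ n) :
    ∀ (fuel : Nat) (k cur : Int) (seen : PySem.Dict Int Int),
      0 ≤ k → k ≤ n → cur = pvPaso^[k.toNat] num → fuel = (n - k).toNat + 1 →
      (∀ v j, seen.get? v = some j → 0 ≤ j ∧ j < k ∧ pvPaso^[j.toNat] num = v) →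
      pvAltLoop seen cur k n fuel = pvPaso^[n.toNat] num := by
  intro fuel
  induction fuel with
  | zero => intro k cur seen hk0 hkn hcur hfuel hinv; omega
  | succ F ih =>
    intro k cur seen hk0 hkn hcur hfuel hinv
    rw [pvAltLoop]
    by_cases hkn' : k < n
    · rw [if_pos hkn']
      cases hg : seen.get? cur with
      | none =>
        exact ih (k + 1) (pvPaso cur) (seen.insert cur k) (by omega) (by omega)
          (by rw [hcur, show (k + 1).toNat = k.toNat + 1 by omega,
                  Function.iterate_succ_apply'])
          (by omega)
          (by intro v j hv
              rw [PySem.Dict.get?_insert] at hv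
              by_cases hvc : v = cur
              · rw [if_pos hvc] at hv
                obtain rfl : j = k := by injection hv with h; omega
                exact ⟨hk0, by omega, by rw [hvc, hcur]⟩
              · rw [if_neg hvc] at hv
                obtain ⟨a, b, cc⟩ := hinv v j hv
                exact ⟨a, by omega, cc⟩)
      | some k0 =>
        simp only []
        obtain ⟨hj0, hjk, hjv⟩ := hinv cur k0 hg
        have hc0 : (0:Int) < k - k0 := by omega
        have hkkN : k.toNat < n.toNat := by omega
        have hrewrite : PySem.Int.mod (n - k) (k - k0) =
            (((n.toNat - k.toNat) % (k.toNat - k0.toNat) : Nat) : Int) := by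
          rw [show n - k = ((n.toNat - k.toNat : Nat) : Int) by omega,
              show k - k0 = ((k.toNat - k0.toNat : Nat) : Int) by omega,
              PySem.Int.mod_natCast]
        rw [hrewrite, PySem.List.pyRange_zero_natCast, List.foldl_const,
            List.length_map, List.length_range, hcur, ← Function.iterate_add_apply]
        set p := k0.toNat with hp
        set kk := k.toNat with hkk
        set N := n.toNat with hN
        set c := kk - p with hc
        set R := (N - kk) % c with hR
        have hcpos : 0 < c := by omega
        have hper : pvPaso^[p + c] num = pvPaso^[p] num := by
          rw [show p + c = kk by omega, ← hcur, hjv]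
        have h1 := iter_per pvPaso num p c hcpos hper (N - p)
        have h2 := iter_per pvPaso num p c hcpos hper (c + R)
        have hRlt : R < c := by rw [hR]; exact Nat.mod_lt _ hcpos
        rw [show R + kk = p + (c + R) by omega, h2,
            show N = p + (N - p) by omega, h1]
        congr 1
        rw [Nat.add_comm c R, Nat.add_mod_right, Nat.mod_eq_of_lt hRlt, hR,
            show N - p = (N - kk) + c by omega, Nat.add_mod_right]
    · rw [if_neg hkn']
      rw [hcur, show k = n by omega]

-- ===== VERDICT (by name: the statement is the Claim_ definition above) =====
theorem siguiendo_reglas_spec : Claim_equal_siguiendo_reglas := by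
  intro num n _ hpre
  obtain ⟨h0, h1⟩ := hpre
  unfold Spec_siguiendo_reglas
  rw [A_eq_iter num n h0 h1]
  unfold siguiendo_reglas_alt
  rw [altLoop_eq num n (by omega) (n.toNat + 1) 0 num PySem.Dict.empty le_rfl (by omega)
    (by simp) (by omega) (by intro v j hv; rw [PySem.Dict.get?_empty] at hv; cases hv)]
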